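-- pv_equiv track=rewrite | github.com/kkoppes/peptools | pep_con_tool/data_processing/arrow_funtions.py | add_suffix
-- ===== SOURCE A (Python) =====
-- def add_suffix(list_of_strings):
--     """function to add suffix list of string entries that are non-unique and use suffix to indicate how many times this entry appears"""
--
--     # create list to store new entries
--     new_list = []
--     # create dictionary to store unique entries
--     unique_dict = {}
--     # loop through list of strings
--     for i in range(len(list_of_strings)):
--         # if string is not in dictionary, don't add suffix
--         # set initial suffix to 1
--         suffix = 0
--         if list_of_strings[i] not in unique_dict:
--             unique_dict[list_of_strings[i]] = list_of_strings[i]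
--             # add string to new list
--             new_list.append(list_of_strings[i])
--         # if string is in dictionary, add suffix
--         else:
--             suffix += 1
--             while list_of_strings[i] + "_" + str(suffix) in unique_dict:
--                 suffix += 1
--
--             unique_dict[list_of_strings[i] + "_" + str(suffix)] = list_of_strings[i] + "_" + str(suffix)
--             # add string to new list
--             new_list.append(list_of_strings[i] + "_" + str(suffix))
--
--     return new_list
-- ===== SOURCE B (Python) =====
-- def add_suffix(list_of_strings):
--     """Deduplicate by appending "_<k>" to repeats; per-base counter avoids rescanning suffixes from 1."""
--     out = []
--     seen = set()
--     next_suffix = {}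
--     for s in list_of_strings:
--         if s not in seen:
--             seen.add(s)
--             out.append(s)
--         else:
--             k = next_suffix.get(s, 1)
--             while s + "_" + str(k) in seen:
--                 k += 1
--             name = s + "_" + str(k)
--             next_suffix[s] = k + 1
--             seen.add(name)
--             out.append(name)
--     return out
-- ===== Notes on version B (the rewrite author's own statement) =====
-- stated objective: faster
-- what changed: Replaces the per-collision rescan of suffixes starting from 1 with a per-base next-suffix counter kept in a dict, so each suffix candidate is tried at most once overall (amortized O(n) string operations instead of O(n^2)).
import Mathlib
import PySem

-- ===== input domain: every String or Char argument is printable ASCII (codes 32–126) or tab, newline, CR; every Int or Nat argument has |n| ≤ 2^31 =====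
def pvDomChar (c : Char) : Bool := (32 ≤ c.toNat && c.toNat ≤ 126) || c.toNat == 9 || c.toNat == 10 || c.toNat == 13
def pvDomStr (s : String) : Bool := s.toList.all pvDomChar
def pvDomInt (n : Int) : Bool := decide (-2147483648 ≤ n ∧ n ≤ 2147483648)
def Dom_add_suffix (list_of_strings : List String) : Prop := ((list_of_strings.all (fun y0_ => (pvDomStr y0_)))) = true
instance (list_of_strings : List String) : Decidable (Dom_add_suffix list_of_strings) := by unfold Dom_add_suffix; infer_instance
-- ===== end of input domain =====

-- B replaces A's per-collision rescan of suffixes from 1 by a per-base next-suffix counter (objective: faster, amortized).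

-- ===== PORT A =====
-- A's inner `while list_of_strings[i] + "_" + str(suffix) in unique_dict: suffix += 1`.
-- Fuel (dict size + 1) only totalizes the loop: among size+1 distinct candidate names one is
-- always absent from the dict, so the fuel-exhausted branch is never the returned value.
def aWhile (fuel : Nat) (unique_dict : PySem.Dict String String) (s : String) (suffix : Int) : Int :=
  match fuel with
  | 0 => suffix
  | fuel + 1 =>
    if unique_dict.contains (s ++ "_" ++ PySem.Int.toStr suffix) then
      aWhile fuel unique_dict s (suffix + 1)
    else suffix

-- one iteration of A's `for i in range(len(list_of_strings))` body (state: new_list, unique_dict)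
def aStep (st : List String × PySem.Dict String String) (s : String) :
    List String × PySem.Dict String String :=
  let new_list := st.1
  let unique_dict := st.2
  if !unique_dict.contains s then
    (new_list ++ [s], unique_dict.insert s s)
  else
    let suffix : Int := 0 + 1
    let suffix := aWhile (unique_dict.size + 1) unique_dict s suffix
    (new_list ++ [s ++ "_" ++ PySem.Int.toStr suffix],
     unique_dict.insert (s ++ "_" ++ PySem.Int.toStr suffix) (s ++ "_" ++ PySem.Int.toStr suffix))

def add_suffix (list_of_strings : List String) : List String :=
  (list_of_strings.foldl aStep ([], PySem.Dict.empty)).1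

-- ===== PORT B =====
-- B's inner `while s + "_" + str(k) in seen: k += 1` (same totalizing fuel as above)
def bWhile (fuel : Nat) (seen : PySem.Set String) (s : String) (k : Int) : Int :=
  match fuel with
  | 0 => k
  | fuel + 1 =>
    if PySem.Set.contains seen (s ++ "_" ++ PySem.Int.toStr k) then
      bWhile fuel seen s (k + 1)
    else k

-- one iteration of B's loop (state: out, seen, next_suffix)
def bStep (st : List String × PySem.Set String × PySem.Dict String Int) (s : String) :
    List String × PySem.Set String × PySem.Dict String Int :=
  let out := st.1
  let seen := st.2.1
  let next_suffix := st.2.2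
  if !PySem.Set.contains seen s then
    (out ++ [s], PySem.Set.add seen s, next_suffix)
  else
    let k := bWhile (seen.length + 1) seen s (next_suffix.getD s 1)
    let name := s ++ "_" ++ PySem.Int.toStr k
    (out ++ [name], PySem.Set.add seen name, next_suffix.insert s (k + 1))

def add_suffix_alt (list_of_strings : List String) : List String :=
  (list_of_strings.foldl bStep ([], PySem.Set.empty, PySem.Dict.empty)).1

-- ===== PRECONDITION & SPEC =====
def Spec_add_suffix (list_of_strings : List String) (out : List String) : Prop := out = add_suffix_alt list_of_strings
instance (list_of_strings : List String) (out : List String) : Decidable (Spec_add_suffix list_of_strings out) := by unfold Spec_add_suffix; infer_instance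

-- ===== CLAIM (what is proved, stated in full; the proofs are below) =====
def Claim_equal_add_suffix : Prop := ∀ (list_of_strings : List String), Dom_add_suffix list_of_strings → Spec_add_suffix list_of_strings (add_suffix list_of_strings)

-- ===== LEMMAS AND PROOFS =====

-- the candidate name for base s and suffix j
def cand (s : String) (j : Int) : String := s ++ "_" ++ PySem.Int.toStr j

-- generic form of both while-loops: membership in a plain list of names
def ff (L : List String) (s : String) : Nat → Int → Int
  | 0, k => k
  | fuel + 1, k => if cand s k ∈ L then ff L s fuel (k + 1) else k

-- invariant linking A's state to B's state
def StInv (stA : List String × PySem.Dict String String)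
    (stB : List String × PySem.Set String × PySem.Dict String Int) : Prop :=
  stA.1 = stB.1 ∧ stA.2.keys = stB.2.1 ∧ stA.2.keys.Nodup ∧
  (∀ s k, stB.2.2.get? s = some k →
    1 ≤ k ∧ ∀ j : Int, 1 ≤ j → j < k → cand s j ∈ stB.2.1)

lemma dec10 {m : Nat} (h : 10 ≤ m) :
    Nat.toDigits 10 m = Nat.toDigits 10 (m / 10) ++ [Nat.digitChar (m % 10)] := by
  have h1 : 0 < m / 10 := Nat.div_pos h (by norm_num)
  have h2 : m % 10 < 10 := Nat.mod_lt _ (by norm_num)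
  have := Nat.toDigits_append_toDigits (b := 10) (n := m / 10) (d := m % 10) (by norm_num) h1 h2
  rw [Nat.toDigits_of_lt_base h2] at this
  have hm : 10 * (m / 10) + m % 10 = m := by omega
  rw [hm] at this
  exact this.symm

lemma digitChar_inj_fin : ∀ a b : Fin 10, Nat.digitChar a.val = Nat.digitChar b.val → a = b := by decide
lemma digitChar_inj (a b : Nat) (ha : a < 10) (hb : b < 10)
    (h : Nat.digitChar a = Nat.digitChar b) : a = b :=
  congrArg Fin.val (digitChar_inj_fin ⟨a, ha⟩ ⟨b, hb⟩ h)

lemma toDigits10_inj : ∀ m n : Nat, Nat.toDigits 10 m = Nat.toDigits 10 n → m = n := by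
  intro m
  induction m using Nat.strong_induction_on with
  | _ m ih =>
    intro n h
    by_cases hm : m < 10 <;> by_cases hn : n < 10
    · rw [Nat.toDigits_of_lt_base hm, Nat.toDigits_of_lt_base hn] at h
      exact digitChar_inj _ _ hm hn (List.singleton_inj.mp h)
    · rw [Nat.toDigits_of_lt_base hm, dec10 (by omega)] at h
      have hlen : (1:Nat) = (Nat.toDigits 10 (n/10)).length + 1 := by
        simpa using congrArg List.length h
      have := @Nat.length_toDigits_pos 10 (n / 10)
      omega
    · rw [dec10 (by omega), Nat.toDigits_of_lt_base hn] at h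
      have hlen : (Nat.toDigits 10 (m/10)).length + 1 = (1:Nat) := by
        simpa using congrArg List.length h
      have := @Nat.length_toDigits_pos 10 (m / 10)
      omega
    · rw [dec10 (by omega : 10 ≤ m), dec10 (by omega : 10 ≤ n)] at h
      rw [← List.concat_eq_append, ← List.concat_eq_append] at h
      obtain ⟨h1, h2⟩ := List.concat_inj.mp h
      have hd := ih (m / 10) (by omega) _ h1
      have hr := digitChar_inj _ _ (Nat.mod_lt _ (by norm_num)) (Nat.mod_lt _ (by norm_num)) h2
      omega
lemma cand_inj {s : String} {j j' : Int} (hj : 1 ≤ j) (hj' : 1 ≤ j')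
    (h : cand s j = cand s j') : j = j' := by
  unfold cand at h
  have h2 : s.toList ++ ('_' :: PySem.Int.toChars j) = s.toList ++ ('_' :: PySem.Int.toChars j') := by
    simpa [String.toList_append, PySem.Int.toList_toStr] using congrArg String.toList h
  have h3 : PySem.Int.toChars j = PySem.Int.toChars j' := by
    have := List.append_cancel_left h2
    simpa using this
  unfold PySem.Int.toChars at h3
  rw [if_neg (by omega), if_neg (by omega)] at h3
  have := toDigits10_inj _ _ h3
  omega
lemma nodup_length_le {l m : List String} (h : l.Nodup) (hs : l ⊆ m) : l.length ≤ m.length := by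
  calc l.length = l.toFinset.card := (List.toFinset_card_of_nodup h).symm
    _ ≤ m.toFinset.card := Finset.card_le_card (fun x hx => by
        simp only [List.mem_toFinset] at *; exact hs hx)
    _ ≤ m.length := m.toFinset_card_le

lemma exists_free (L : List String) (s : String) (k : Int) (hk : 1 ≤ k) :
    ∃ j : Nat, j ≤ L.length ∧ cand s (k + j) ∉ L := by
  by_contra hcon
  push Not at hcon
  have hall : ∀ j : Nat, j ≤ L.length → cand s (k + j) ∈ L := hcon
  set M : List String := (List.range (L.length + 1)).map (fun j : Nat => cand s (k + (j : Int))) with hM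
  have hinj : Function.Injective (fun j : Nat => cand s (k + j)) := by
    intro a b hab
    have := cand_inj (by omega) (by omega) hab
    omega
  have hndM : M.Nodup := (List.nodup_range).map hinj
  have hsub : M ⊆ L := by
    intro x hx
    rw [hM, List.mem_map] at hx
    obtain ⟨j, hj, rfl⟩ := hx
    exact hall j (by simpa using Nat.lt_succ_iff.mp (List.mem_range.mp hj))
  have := nodup_length_le hndM hsub
  simp [hM] at this

lemma ff_spec (L : List String) (s : String) :
    ∀ (fuel : Nat) (k : Int), (∃ j : Nat, j < fuel ∧ cand s (k + j) ∉ L) →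
      k ≤ ff L s fuel k ∧ cand s (ff L s fuel k) ∉ L ∧
        ∀ i : Int, k ≤ i → i < ff L s fuel k → cand s i ∈ L := by
  intro fuel
  induction fuel with
  | zero => intro k h; obtain ⟨j, hj, _⟩ := h; omega
  | succ fuel ih =>
    intro k h
    obtain ⟨j, hj, hfree⟩ := h
    simp only [ff]
    by_cases hmem : cand s k ∈ L
    · rw [if_pos hmem]
      have hj0 : j ≠ 0 := by rintro rfl; simp at hfree; exact hfree (by simpa using hmem)
      have hex : ∃ j' : Nat, j' < fuel ∧ cand s (k + 1 + j') ∉ L := by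
        refine ⟨j - 1, by omega, ?_⟩
        have : k + 1 + ((j - 1 : Nat) : Int) = k + j := by
          omega
        rwa [this]
      obtain ⟨h1, h2, h3⟩ := ih (k + 1) hex
      refine ⟨by omega, h2, ?_⟩
      intro i hki hlt
      by_cases hik : i = k
      · subst hik; exact hmem
      · exact h3 i (by omega) hlt
    · rw [if_neg hmem]
      exact ⟨le_refl _, hmem, by intro i h1 h2; omega⟩

lemma aWhile_eq_ff (d : PySem.Dict String String) (s : String) :
    ∀ (fuel : Nat) (k : Int), aWhile fuel d s k = ff d.keys s fuel k := by
  intro fuel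
  induction fuel with
  | zero => intro k; rfl
  | succ fuel ih =>
    intro k
    simp only [aWhile, ff, PySem.Dict.contains_eq_decide_mem_keys, cand]
    by_cases h : s ++ "_" ++ PySem.Int.toStr k ∈ d.keys <;> simp [h, ih]

lemma bWhile_eq_ff (L : PySem.Set String) (s : String) :
    ∀ (fuel : Nat) (k : Int), bWhile fuel L s k = ff L s fuel k := by
  intro fuel
  induction fuel with
  | zero => intro k; rfl
  | succ fuel ih =>
    intro k
    simp only [bWhile, ff, PySem.Set.contains, cand]
    by_cases h : s ++ "_" ++ PySem.Int.toStr k ∈ L <;> simp [h, ih]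

lemma size_eq_keys_length (d : PySem.Dict String String) : d.size = d.keys.length := by
  simp [PySem.Dict.size, PySem.Dict.keys]


lemma step_inv (stA : List String × PySem.Dict String String)
    (stB : List String × PySem.Set String × PySem.Dict String Int)
    (h : StInv stA stB) (s : String) : StInv (aStep stA s) (bStep stB s) := by
  obtain ⟨hout, hkeys, hnd, hctr⟩ := h
  obtain ⟨outA, d⟩ := stA
  obtain ⟨outB, seen, ctr⟩ := stB
  simp only at hout hkeys hnd hctr
  subst hout hkeys
  simp only [aStep, bStep, PySem.Set.contains, PySem.Dict.contains_eq_decide_mem_keys]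
  by_cases hmem : s ∈ d.keys
  · -- collision branch
    rw [if_neg (by simp [hmem]), if_neg (by simp [hmem])]
    have hk0 : 1 ≤ ctr.getD s 1 ∧
        (∀ j : Int, 1 ≤ j → j < ctr.getD s 1 → cand s j ∈ d.keys) := by
      rw [PySem.Dict.getD_eq_get?_getD]
      cases hg : ctr.get? s with
      | none => exact ⟨by simp, by simp; omega⟩
      | some k => simpa using hctr s k hg
    set k0 := ctr.getD s 1 with hk0def
    have hexA : ∃ j : Nat, j < d.keys.length + 1 ∧ cand s ((1 : Int) + j) ∉ d.keys := by
      obtain ⟨j, hj, hf⟩ := exists_free d.keys s 1 (by omega)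
      exact ⟨j, by omega, hf⟩
    have hexB : ∃ j : Nat, j < d.keys.length + 1 ∧ cand s (k0 + j) ∉ d.keys := by
      obtain ⟨j, hj, hf⟩ := exists_free d.keys s k0 hk0.1
      exact ⟨j, by omega, hf⟩
    have specA := ff_spec d.keys s (d.keys.length + 1) 1 hexA
    have specB := ff_spec d.keys s (d.keys.length + 1) k0 hexB
    set mA := ff d.keys s (d.keys.length + 1) 1 with hmA
    set mB := ff d.keys s (d.keys.length + 1) k0 with hmB
    have hmAB : mA = mB := by
      by_contra hne
      rcases lt_or_gt_of_ne hne with hlt | hgt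
      · by_cases hka : mA < k0
        · exact specA.2.1 (hk0.2 mA specA.1 hka)
        · exact specA.2.1 (specB.2.2 mA (by omega) hlt)
      · exact specB.2.1 (specA.2.2 mB (by omega) hgt)
    have hAw : aWhile (d.size + 1) d s (0 + 1) = mA := by
      rw [aWhile_eq_ff, size_eq_keys_length]
      norm_num [hmA]
    have hBw : bWhile (d.keys.length + 1) d.keys s k0 = mB := by
      rw [bWhile_eq_ff, hmB]
    rw [hAw, hBw, ← hmAB]
    have hfreeA : s ++ "_" ++ PySem.Int.toStr mA ∉ d.keys := specA.2.1
    have htk : (d.insert (s ++ "_" ++ PySem.Int.toStr mA) (s ++ "_" ++ PySem.Int.toStr mA)).keys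
        = d.keys ++ [s ++ "_" ++ PySem.Int.toStr mA] := by
      apply PySem.Dict.keys_insert_of_not_contains
      simp [PySem.Dict.contains_eq_decide_mem_keys, hfreeA]
    have hadd : PySem.Set.add d.keys (s ++ "_" ++ PySem.Int.toStr mA)
        = d.keys ++ [s ++ "_" ++ PySem.Int.toStr mA] := by
      simp [PySem.Set.add, PySem.Set.contains, hfreeA]
    refine ⟨rfl, ?_, ?_, ?_⟩
    · dsimp only
      rw [htk, hadd]
    · dsimp only
      rw [htk]
      simp only [List.nodup_append, List.nodup_cons, List.not_mem_nil, not_false_iff,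
        List.nodup_nil, and_true, true_and]
      refine ⟨hnd, ?_⟩
      intro a ha b hb
      simp only [List.mem_singleton] at hb
      subst hb
      intro hab
      exact hfreeA (hab ▸ ha)
    · dsimp only
      intro s' k hk
      rw [PySem.Dict.get?_insert] at hk
      by_cases hs' : s' = s
      · subst hs'
        rw [if_pos rfl] at hk
        injection hk with hk
        refine ⟨by have := specA.1; omega, ?_⟩
        intro j hj1 hjk
        rw [hadd]
        by_cases hjm : j = mA
        · subst hjm; simp [cand]
        · exact List.mem_append_left _ (specA.2.2 j hj1 (by omega))
      · rw [if_neg hs'] at hk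
        obtain ⟨h1, h2⟩ := hctr s' k hk
        rw [hadd]
        exact ⟨h1, fun j hj1 hj2 => List.mem_append_left _ (h2 j hj1 hj2)⟩
  · -- fresh branch
    rw [if_pos (by simp [hmem]), if_pos (by simp [hmem])]
    have htk : (d.insert s s).keys = d.keys ++ [s] :=
      PySem.Dict.keys_insert_of_not_contains d s
        (by simp [PySem.Dict.contains_eq_decide_mem_keys, hmem])
    have hadd : PySem.Set.add d.keys s = d.keys ++ [s] := by
      simp [PySem.Set.add, PySem.Set.contains, hmem]
    refine ⟨rfl, ?_, ?_, ?_⟩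
    · dsimp only
      rw [htk, hadd]
    · dsimp only
      rw [htk]
      simp only [List.nodup_append, List.nodup_cons, List.not_mem_nil, not_false_iff,
        List.nodup_nil, and_true, true_and]
      refine ⟨hnd, ?_⟩
      intro a ha b hb
      simp only [List.mem_singleton] at hb
      subst hb
      intro hab
      exact hmem (hab ▸ ha)
    · dsimp only
      intro s' k hk
      obtain ⟨h1, h2⟩ := hctr s' k hk
      rw [hadd]
      exact ⟨h1, fun j hj1 hj2 => List.mem_append_left _ (h2 j hj1 hj2)⟩


lemma foldl_inv (l : List String) (stA : List String × PySem.Dict String String)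
    (stB : List String × PySem.Set String × PySem.Dict String Int)
    (h : StInv stA stB) : StInv (l.foldl aStep stA) (l.foldl bStep stB) := by
  induction l generalizing stA stB with
  | nil => exact h
  | cons x xs ih => exact ih _ _ (step_inv _ _ h x)

-- ===== VERDICT (by name: the statement is the Claim_ definition above) =====
theorem add_suffix_spec : Claim_equal_add_suffix := by
  intro l _
  unfold Spec_add_suffix add_suffix add_suffix_alt
  have h := foldl_inv l ([], PySem.Dict.empty) ([], PySem.Set.empty, PySem.Dict.empty)
    ⟨rfl, rfl, List.nodup_nil, by intro s k hk; simp [PySem.Dict.get?_empty] at hk⟩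
  exact h.1
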